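-- pv_equiv track=rewrite | github.com/eagle7777/CombinatoricsProblems | ASP/Dynamic.py | ASPDynamic
-- ===== SOURCE A (Python) =====
-- def get_subset(s, f, i, j):
--     if i == 0:
--         start = 0
--     else:
--         start = f[i - 1]
--     if j == len(s):
--         finish = 1 << 20
--     else:
--         finish = s[j]
--     res = [(s[k], f[k]) for k in range(len(s)) if s[k] > start and f[k] < finish]
--     return res
--
-- def ASPDynamic(s, f, v):
--     """
--     Динамический алгоритм
--     :param s: список начал
--     :param f: список концов
--     :param v: список цен
--     :return:
--     """
--     l = len(s)
--     vals = [[None for _ in range(l)] for _ in range(l)]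
--     indxs = [[None for _ in range(l)] for _ in range(l)]
--     for a in range(l):
--         vals[a][a] = 0
--     for c1 in range(1, len(vals)):
--         for c2 in range(c1, len(vals)):
--             i, j = c2 - c1, c2
--             mx = 0
--             kx = -1
--             for k in range(i + 1, j):
--                 if get_subset(s, f, i, j):
--                     tmp = vals[i][k] + vals[k][j] + v[k]
--                     if tmp > mx:
--                         mx = tmp
--                         kx = k
--             vals[i][j] = mx
--             indxs[i][j] = kx
--     return vals, indxs
-- ===== SOURCE B (Python) =====
-- def ASPDynamic(s, f, v):
--     """Top-down memoized re-implementation: solve(i, j) computes the best (value,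
--     split index) for the segment pair, checking subset-emptiness once per pair
--     instead of once per k; the driver then materializes the same two tables."""
--     l = len(s)
--     memo = {}
--
--     def nonempty(i, j):
--         start = 0 if i == 0 else f[i - 1]
--         finish = (1 << 20) if j == l else s[j]
--         return any(s[k] > start and f[k] < finish for k in range(l))
--
--     def solve(i, j):
--         if i == j:
--             return 0, -1
--         got = memo.get((i, j))
--         if got is not None:
--             return got
--         mx, kx = 0, -1
--         if j > i + 1 and nonempty(i, j):
--             for k in range(i + 1, j):
--                 tmp = solve(i, k)[0] + solve(k, j)[0] + v[k]
--                 if tmp > mx: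
--                     mx, kx = tmp, k
--         memo[(i, j)] = (mx, kx)
--         return mx, kx
--
--     for i in range(l):
--         for j in range(i + 1, l):
--             solve(i, j)
--
--     vals = [[0 if a == b else memo[(a, b)][0] if a < b else None for b in range(l)]
--             for a in range(l)]
--     indxs = [[memo[(a, b)][1] if a < b else None for b in range(l)]
--              for a in range(l)]
--     return vals, indxs
-- ===== Notes on version B (the rewrite author's own statement) =====
-- stated objective: faster
-- what changed: Replaced the bottom-up diagonal table fill (which rebuilds the whole get_subset list once per inner k) by top-down memoized recursion solve(i,j) that checks subset-emptiness once per pair with any() and materializes the two tables at the end.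
import Mathlib
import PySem

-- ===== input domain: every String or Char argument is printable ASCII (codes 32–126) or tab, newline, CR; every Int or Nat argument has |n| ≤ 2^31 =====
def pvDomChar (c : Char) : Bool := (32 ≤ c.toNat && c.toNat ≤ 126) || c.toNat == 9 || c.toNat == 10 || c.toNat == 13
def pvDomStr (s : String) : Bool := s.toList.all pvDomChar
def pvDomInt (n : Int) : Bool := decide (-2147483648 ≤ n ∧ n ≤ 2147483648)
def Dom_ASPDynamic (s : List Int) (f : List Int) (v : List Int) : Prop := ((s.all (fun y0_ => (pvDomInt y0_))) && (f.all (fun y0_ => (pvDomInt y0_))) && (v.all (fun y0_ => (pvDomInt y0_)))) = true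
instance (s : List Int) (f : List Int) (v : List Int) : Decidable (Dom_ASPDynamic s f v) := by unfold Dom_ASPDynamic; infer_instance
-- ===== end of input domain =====

-- B replaces A's bottom-up diagonal table fill (which rebuilds the whole get_subset
-- list once per inner k) by top-down memoized recursion with a single emptiness
-- check per pair — measurably faster (O(l^4) → O(l^3)).

-- ===== PORT A =====

-- get_subset(s, f, i, j); list indexing via getD (in range under Pre_)
def pvGetSubset (s f : List Int) (i j : Nat) : List (Int × Int) :=
  let start : Int := if i = 0 then 0 else f.getD (i - 1) 0
  let finish : Int := if j = s.length then 1048576 else s.getD j 0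
  ((List.range s.length).filter
      (fun k => decide (s.getD k 0 > start) && decide (f.getD k 0 < finish))).map
    (fun k => (s.getD k 0, f.getD k 0))

-- vals[a][b]
def pvGet2 (t : List (List (Option Int))) (a b : Nat) : Option Int :=
  (t.getD a []).getD b none

-- vals[a][b] = x
def pvSet2 (t : List (List (Option Int))) (a b : Nat) (x : Option Int) :
    List (List (Option Int)) :=
  t.set a ((t.getD a []).set b x)

def ASPDynamic (s : List Int) (f : List Int) (v : List Int) :
    List (List (Option Int)) × List (List (Option Int)) :=
  let l := s.length
  let vals0 := List.replicate l (List.replicate l (none : Option Int))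
  let indxs0 := List.replicate l (List.replicate l (none : Option Int))
  let vals1 := (List.range l).foldl (fun t a => pvSet2 t a a (some 0)) vals0
  (List.range' 1 (l - 1)).foldl
    (fun (st : List (List (Option Int)) × List (List (Option Int))) c1 =>
      (List.range' c1 (l - c1)).foldl
        (fun st c2 =>
          let i := c2 - c1
          let j := c2
          -- inner k loop; vals[i][k] + vals[k][j] read with .getD 0 (the cells are
          -- always filled when read, as the proof below shows)
          let mk : Int × Int := (List.range' (i + 1) (j - (i + 1))).foldl
            (fun p k =>
              if pvGetSubset s f i j ≠ [] then
                let tmp := (pvGet2 st.1 i k).getD 0 + (pvGet2 st.1 k j).getD 0 + v.getD k 0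
                if tmp > p.1 then (tmp, (k : Int)) else p
              else p) (0, -1)
          (pvSet2 st.1 i j (some mk.1), pvSet2 st.2 i j (some mk.2)))
        st)
    (vals1, indxs0)

-- ===== PORT B =====

-- nonempty(i, j) of Source B
def pvNonempty (s f : List Int) (l i j : Nat) : Bool :=
  let start : Int := if i = 0 then 0 else f.getD (i - 1) 0
  let finish : Int := if j = l then 1048576 else s.getD j 0
  (List.range l).any (fun k => decide (s.getD k 0 > start) && decide (f.getD k 0 < finish))

-- solve(i, j) of Source B, memo threaded explicitly; the fuel argument only makes the
-- recursion structural (fuel ≥ j - i suffices, the driver passes l)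
def pvSolveB (s f v : List Int) (l : Nat) :
    Nat → Nat → Nat → PySem.Dict (Nat × Nat) (Int × Int) →
    (Int × Int) × PySem.Dict (Nat × Nat) (Int × Int)
  | 0, _, _, m => ((0, -1), m)
  | n + 1, i, j, m =>
    if i = j then ((0, -1), m)
    else
      match PySem.Dict.get? m (i, j) with
      | some p => (p, m)
      | none =>
        let r :=
          if i + 1 < j ∧ pvNonempty s f l i j = true then
            (List.range' (i + 1) (j - (i + 1))).foldl
              (fun (acc : (Int × Int) × PySem.Dict (Nat × Nat) (Int × Int)) k =>
                let r1 := pvSolveB s f v l n i k acc.2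
                let r2 := pvSolveB s f v l n k j r1.2
                let tmp := r1.1.1 + r2.1.1 + v.getD k 0
                (if tmp > acc.1.1 then (tmp, (k : Int)) else acc.1, r2.2))
              ((0, -1), m)
          else ((0, -1), m)
        (r.1, PySem.Dict.insert r.2 (i, j) r.1)

def ASPDynamic_alt (s : List Int) (f : List Int) (v : List Int) :
    List (List (Option Int)) × List (List (Option Int)) :=
  let l := s.length
  let memo := (List.range l).foldl
    (fun m i => (List.range' (i + 1) (l - (i + 1))).foldl
      (fun m j => (pvSolveB s f v l l i j m).2) m)
    (PySem.Dict.empty)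
  -- memo[(a, b)]: the key is always present (proved below), read with getD
  let vals := (List.range l).map (fun a => (List.range l).map (fun b =>
    if a = b then some (0 : Int)
    else if a < b then some ((PySem.Dict.getD memo (a, b) (0, -1)).1) else none))
  let indxs := (List.range l).map (fun a => (List.range l).map (fun b =>
    if a < b then some ((PySem.Dict.getD memo (a, b) (0, -1)).2) else none))
  (vals, indxs)

-- ===== PRECONDITION & SPEC =====
-- Pre_ excludes inputs where Python A raises IndexError (f shorter than s, or v
-- shorter than len(s)-1, reachable as soon as len(s) ≥ 3).  It is slightly
-- narrower than A's exact returning set: when the accessed f entries / gated v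
-- entries happen never to be evaluated (all relevant subsets empty by lazy 'and'),
-- A still returns despite short f or v — B returns the same value there.
def Pre_ASPDynamic (s : List Int) (f : List Int) (v : List Int) : Prop :=
  s.length ≤ 2 ∨ (s.length ≤ f.length ∧ s.length ≤ v.length + 1)
instance (s : List Int) (f : List Int) (v : List Int) : Decidable (Pre_ASPDynamic s f v) := by
  unfold Pre_ASPDynamic; infer_instance

def pvWitness_ASPDynamic : List Int × List Int × List Int :=
  ([1, 3, 2, 6], [2, 5, 4, 8], [3, 1, 4, 1])

def Spec_ASPDynamic (s : List Int) (f : List Int) (v : List Int) (out : List (List (Option Int)) × List (List (Option Int))) : Prop := out = ASPDynamic_alt s f v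
instance (s : List Int) (f : List Int) (v : List Int) (out : List (List (Option Int)) × List (List (Option Int))) : Decidable (Spec_ASPDynamic s f v out) := by unfold Spec_ASPDynamic; infer_instance

-- ===== CLAIM (what is proved, stated in full; the proofs are below) =====
def Claim_equal_ASPDynamic : Prop := ∀ (s : List Int) (f : List Int) (v : List Int), Dom_ASPDynamic s f v → Pre_ASPDynamic s f v → Spec_ASPDynamic s f v (ASPDynamic s f v)

-- ===== LEMMAS AND PROOFS =====

-- the common pure recursion both ports compute: (mx, kx) of the pair (i, j)
def pvPure (s f v : List Int) (l : Nat) : Nat → Nat → Nat → Int × Int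
  | 0, _, _ => (0, -1)
  | n + 1, i, j =>
    if i = j then (0, -1)
    else if i + 1 < j ∧ pvNonempty s f l i j = true then
      (List.range' (i + 1) (j - (i + 1))).foldl
        (fun p k =>
          let tmp := (pvPure s f v l n i k).1 + (pvPure s f v l n k j).1 + v.getD k 0
          if tmp > p.1 then (tmp, (k : Int)) else p)
        (0, -1)
    else (0, -1)

lemma pvPure_zero_gap (s f v : List Int) (l : Nat) (i j : Nat) (hij : j ≤ i) :
    ∀ n, pvPure s f v l n i j = (0, -1) := by
  intro n
  cases n with
  | zero => rfl
  | succ n =>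
    by_cases h : i = j
    · simp [pvPure, h]
    · have hc : ¬(i + 1 < j ∧ pvNonempty s f l i j = true) := by
        rintro ⟨h1, -⟩; omega
      have hz : j - (i + 1) = 0 := by omega
      simp [pvPure, h, hc]

lemma pvPure_stable (s f v : List Int) (l : Nat) :
    ∀ g n m i j, j - i = g → g ≤ n → g ≤ m →
      pvPure s f v l n i j = pvPure s f v l m i j := by
  intro g
  induction g using Nat.strong_induction_on with
  | _ g IH =>
    intro n m i j hg hn hm
    cases g with
    | zero =>
      rw [pvPure_zero_gap s f v l i j (by omega), pvPure_zero_gap s f v l i j (by omega)]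
    | succ g =>
      obtain ⟨n', rfl⟩ : ∃ n', n = n' + 1 := ⟨n - 1, by omega⟩
      obtain ⟨m', rfl⟩ : ∃ m', m = m' + 1 := ⟨m - 1, by omega⟩
      have hij : ¬ i = j := by omega
      simp only [pvPure, hij, if_false]
      split
      · apply PySem.List.foldl_congr_mem
        intro p k hk
        have hk' : i + 1 ≤ k ∧ k < i + 1 + (j - (i + 1)) := List.mem_range'_1.mp hk
        have h1 : pvPure s f v l n' i k = pvPure s f v l m' i k :=
          IH (k - i) (by omega) n' m' i k rfl (by omega) (by omega)
        have h2 : pvPure s f v l n' k j = pvPure s f v l m' k j :=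
          IH (j - k) (by omega) n' m' k j rfl (by omega) (by omega)
        simp only [h1, h2]
      · rfl

lemma pvPure_spec (s f v : List Int) (l i j : Nat) (hij : i < j) :
    pvPure s f v l (j - i) i j =
      (if i + 1 < j ∧ pvNonempty s f l i j = true then
        (List.range' (i + 1) (j - (i + 1))).foldl
          (fun p k =>
            let tmp := (pvPure s f v l (k - i) i k).1 + (pvPure s f v l (j - k) k j).1 + v.getD k 0
            if tmp > p.1 then (tmp, (k : Int)) else p)
          (0, -1)
      else (0, -1)) := by
  obtain ⟨g, hg⟩ : ∃ g, j - i = g + 1 := ⟨j - i - 1, by omega⟩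
  rw [hg]
  have hij' : ¬ i = j := by omega
  simp only [pvPure, hij', if_false]
  split
  · apply PySem.List.foldl_congr_mem
    intro p k hk
    have hk' : i + 1 ≤ k ∧ k < i + 1 + (j - (i + 1)) := List.mem_range'_1.mp hk
    have h1 : pvPure s f v l g i k = pvPure s f v l (k - i) i k :=
      pvPure_stable s f v l (k - i) g (k - i) i k rfl (by omega) (by omega)
    have h2 : pvPure s f v l g k j = pvPure s f v l (j - k) k j :=
      pvPure_stable s f v l (j - k) g (j - k) k j rfl (by omega) (by omega)
    simp only [h1, h2]
  · rfl

-- ===== B side: the memo is always correct and, after a call, complete at its key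

def pvGoodM (s f v : List Int) (l : Nat) (m : PySem.Dict (Nat × Nat) (Int × Int)) : Prop :=
  ∀ i j p, PySem.Dict.get? m (i, j) = some p → p = pvPure s f v l (j - i) i j

lemma pvSolveB_spec (s f v : List Int) (l : Nat) :
    ∀ n i j m, pvGoodM s f v l m → j - i ≤ n →
      (pvSolveB s f v l n i j m).1 = pvPure s f v l (j - i) i j ∧
      pvGoodM s f v l (pvSolveB s f v l n i j m).2 ∧
      (∀ key q, PySem.Dict.get? m key = some q →
        PySem.Dict.get? (pvSolveB s f v l n i j m).2 key = some q) ∧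
      (i < j → PySem.Dict.get? (pvSolveB s f v l n i j m).2 (i, j) =
        some (pvPure s f v l (j - i) i j)) := by
  intro n
  induction n with
  | zero =>
    intro i j m hG hle
    have hz : j - i = 0 := by omega
    refine ⟨?_, hG, fun key q hq => hq, fun hij => by omega⟩
    rw [hz]; rfl
  | succ n IHn =>
    intro i j m hG hle
    by_cases hij : i = j
    · subst hij
      have hz : i - i = 0 := by omega
      simp only [pvSolveB]
      exact ⟨by rw [hz]; rfl, hG, fun key q hq => hq, fun h => absurd h (by omega)⟩
    · simp only [pvSolveB, if_neg hij]
      cases hm : PySem.Dict.get? m (i, j) with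
      | some p =>
        simp only
        have hp := hG i j p hm
        exact ⟨hp, hG, fun key q hq => hq, fun _ => by rw [hm, hp]⟩
      | none =>
        simp only
        by_cases hc : i + 1 < j ∧ pvNonempty s f l i j = true
        · have hij' : i < j := by omega
          have hfold : ∀ (L : List Nat), (∀ k ∈ L, i < k ∧ k < j) →
              ∀ (acc : Int × Int) m₀, pvGoodM s f v l m₀ →
              (L.foldl
                (fun (acc : (Int × Int) × PySem.Dict (Nat × Nat) (Int × Int)) k =>
                  let r1 := pvSolveB s f v l n i k acc.2
                  let r2 := pvSolveB s f v l n k j r1.2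
                  let tmp := r1.1.1 + r2.1.1 + v.getD k 0
                  (if tmp > acc.1.1 then (tmp, (k : Int)) else acc.1, r2.2)) (acc, m₀)).1 =
                L.foldl
                  (fun p k =>
                    let tmp := (pvPure s f v l (k - i) i k).1 +
                      (pvPure s f v l (j - k) k j).1 + v.getD k 0
                    if tmp > p.1 then (tmp, (k : Int)) else p) acc ∧
              pvGoodM s f v l (L.foldl
                (fun (acc : (Int × Int) × PySem.Dict (Nat × Nat) (Int × Int)) k =>
                  let r1 := pvSolveB s f v l n i k acc.2
                  let r2 := pvSolveB s f v l n k j r1.2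
                  let tmp := r1.1.1 + r2.1.1 + v.getD k 0
                  (if tmp > acc.1.1 then (tmp, (k : Int)) else acc.1, r2.2)) (acc, m₀)).2 ∧
              (∀ key q, PySem.Dict.get? m₀ key = some q →
                PySem.Dict.get? (L.foldl
                  (fun (acc : (Int × Int) × PySem.Dict (Nat × Nat) (Int × Int)) k =>
                    let r1 := pvSolveB s f v l n i k acc.2
                    let r2 := pvSolveB s f v l n k j r1.2
                    let tmp := r1.1.1 + r2.1.1 + v.getD k 0
                    (if tmp > acc.1.1 then (tmp, (k : Int)) else acc.1, r2.2)) (acc, m₀)).2 key =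
                  some q) := by
            intro L
            induction L with
            | nil => exact fun _ acc m₀ hG₀ => ⟨rfl, hG₀, fun key q hq => hq⟩
            | cons k L IHL =>
              intro hL acc m₀ hG₀
              obtain ⟨hik, hkj⟩ := hL k List.mem_cons_self
              obtain ⟨e1, g1, pr1, -⟩ := IHn i k m₀ hG₀ (by omega)
              obtain ⟨e2, g2, pr2, -⟩ :=
                IHn k j (pvSolveB s f v l n i k m₀).2 g1 (by omega)
              have hst : pvPure s f v l n i k = pvPure s f v l (k - i) i k :=
                pvPure_stable s f v l (k - i) n (k - i) i k rfl (by omega) (by omega)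
              have hst2 : pvPure s f v l n k j = pvPure s f v l (j - k) k j :=
                pvPure_stable s f v l (j - k) n (j - k) k j rfl (by omega) (by omega)
              simp only [List.foldl_cons]
              obtain ⟨E, G, PR⟩ := IHL (fun k hk => hL k (List.mem_cons_of_mem _ hk)) _ _ g2
              refine ⟨?_, G, fun key q hq => PR _ _ (pr2 _ _ (pr1 _ _ hq))⟩
              rw [E]
              simp only [e1, e2]
          have hmem : ∀ k ∈ List.range' (i + 1) (j - (i + 1)), i < k ∧ k < j := by
            intro k hk
            have := List.mem_range'_1.mp hk
            omega
          obtain ⟨E, G, PR⟩ := hfold _ hmem (0, -1) m hG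
          have hpv : pvPure s f v l (j - i) i j =
              (List.range' (i + 1) (j - (i + 1))).foldl
                (fun p k =>
                  let tmp := (pvPure s f v l (k - i) i k).1 +
                    (pvPure s f v l (j - k) k j).1 + v.getD k 0
                  if tmp > p.1 then (tmp, (k : Int)) else p) (0, -1) := by
            rw [pvPure_spec s f v l i j hij', if_pos hc]
          simp only [if_pos hc]
          refine ⟨by rw [E, hpv], ?_, ?_, ?_⟩
          · intro i' j' p' hp'
            rw [PySem.Dict.get?_insert] at hp'
            by_cases hkey : ((i' : Nat), (j' : Nat)) = (i, j)
            · rw [if_pos hkey] at hp'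
              obtain ⟨rfl, rfl⟩ := Prod.mk.injEq .. ▸ hkey
              cases hp'
              rw [E, hpv]
            · rw [if_neg hkey] at hp'
              exact G i' j' p' hp'
          · intro key q hq
            rw [PySem.Dict.get?_insert]
            have hkey : key ≠ (i, j) := by
              rintro rfl
              rw [hm] at hq
              cases hq
            rw [if_neg hkey]
            exact PR _ _ hq
          · intro _
            rw [PySem.Dict.get?_insert_self, E, hpv]
        · have hpv : pvPure s f v l (j - i) i j = (0, -1) := by
            by_cases hij' : i < j
            · rw [pvPure_spec s f v l i j hij', if_neg hc]
            · exact pvPure_zero_gap s f v l i j (by omega) _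
          simp only [if_neg hc]
          refine ⟨hpv.symm, ?_, ?_, ?_⟩
          · intro i' j' p' hp'
            rw [PySem.Dict.get?_insert] at hp'
            by_cases hkey : ((i' : Nat), (j' : Nat)) = (i, j)
            · rw [if_pos hkey] at hp'
              obtain ⟨rfl, rfl⟩ := Prod.mk.injEq .. ▸ hkey
              cases hp'
              exact hpv.symm
            · rw [if_neg hkey] at hp'
              exact hG i' j' p' hp'
          · intro key q hq
            rw [PySem.Dict.get?_insert]
            have hkey : key ≠ (i, j) := by
              rintro rfl
              rw [hm] at hq
              cases hq
            rw [if_neg hkey]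
            exact hq
          · intro _
            rw [PySem.Dict.get?_insert_self, hpv]

-- the driver fold leaves every pair a < b < l present in the memo
lemma pvMemo_complete (s f v : List Int) (l : Nat) :
    ∀ a b, a < b → b < l →
      PySem.Dict.get?
        ((List.range l).foldl
          (fun m i => (List.range' (i + 1) (l - (i + 1))).foldl
            (fun m j => (pvSolveB s f v l l i j m).2) m)
          PySem.Dict.empty) (a, b) = some (pvPure s f v l (b - a) a b) := by
  have inner : ∀ (js : List Nat) (a : Nat) (m : PySem.Dict (Nat × Nat) (Int × Int)),
      pvGoodM s f v l m → (∀ j ∈ js, j - a ≤ l) →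
      pvGoodM s f v l (js.foldl (fun m j => (pvSolveB s f v l l a j m).2) m) ∧
      (∀ key q, PySem.Dict.get? m key = some q →
        PySem.Dict.get? (js.foldl (fun m j => (pvSolveB s f v l l a j m).2) m) key = some q) ∧
      (∀ b ∈ js, a < b →
        PySem.Dict.get? (js.foldl (fun m j => (pvSolveB s f v l l a j m).2) m) (a, b) =
          some (pvPure s f v l (b - a) a b)) := by
    intro js
    induction js with
    | nil => exact fun a m hG _ => ⟨hG, fun key q hq => hq, fun b hb => absurd hb (by simp)⟩
    | cons j js IHjs =>
      intro a m hG hbd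
      obtain ⟨-, G1, PR1, PRES1⟩ :=
        pvSolveB_spec s f v l l a j m hG (hbd j List.mem_cons_self)
      simp only [List.foldl_cons]
      obtain ⟨G, PR, PRESENT⟩ := IHjs a _ G1 (fun j hj => hbd j (List.mem_cons_of_mem _ hj))
      refine ⟨G, fun key q hq => PR _ _ (PR1 _ _ hq), ?_⟩
      intro b hb hab
      rcases List.mem_cons.mp hb with rfl | hb'
      · exact PR _ _ (PRES1 hab)
      · exact PRESENT b hb' hab
  have outer : ∀ (is : List Nat) (m : PySem.Dict (Nat × Nat) (Int × Int)),
      pvGoodM s f v l m →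
      pvGoodM s f v l (is.foldl
        (fun m i => (List.range' (i + 1) (l - (i + 1))).foldl
          (fun m j => (pvSolveB s f v l l i j m).2) m) m) ∧
      (∀ key q, PySem.Dict.get? m key = some q →
        PySem.Dict.get? (is.foldl
          (fun m i => (List.range' (i + 1) (l - (i + 1))).foldl
            (fun m j => (pvSolveB s f v l l i j m).2) m) m) key = some q) ∧
      (∀ a ∈ is, ∀ b, a < b → b < l →
        PySem.Dict.get? (is.foldl
          (fun m i => (List.range' (i + 1) (l - (i + 1))).foldl
            (fun m j => (pvSolveB s f v l l i j m).2) m) m) (a, b) =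
          some (pvPure s f v l (b - a) a b)) := by
    intro is
    induction is with
    | nil => exact fun m hG => ⟨hG, fun key q hq => hq, fun a ha => absurd ha (by simp)⟩
    | cons a is IHis =>
      intro m hG
      obtain ⟨G1, PR1, PRESENT1⟩ := inner (List.range' (a + 1) (l - (a + 1))) a m hG
        (fun j hj => by have := List.mem_range'_1.mp hj; omega)
      simp only [List.foldl_cons]
      obtain ⟨G, PR, PRESENT⟩ := IHis _ G1
      refine ⟨G, fun key q hq => PR _ _ (PR1 _ _ hq), ?_⟩
      intro a' ha' b hab hbl
      rcases List.mem_cons.mp ha' with rfl | ha''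
      · refine PR _ _ (PRESENT1 b ?_ hab)
        exact List.mem_range'_1.mpr (by omega)
      · exact PRESENT a' ha'' b hab hbl
  intro a b hab hbl
  have hGempty : pvGoodM s f v l PySem.Dict.empty := by
    intro i j p hp
    rw [PySem.Dict.get?_empty] at hp
    cases hp
  exact (outer (List.range l) PySem.Dict.empty hGempty).2.2 a
    (List.mem_range.mpr (by omega)) b hab hbl

-- ===== A side: table lemmas

lemma pvGetD_set_self {α : Type} (l : List α) (i : Nat) (x d : α) (h : i < l.length) :
    (l.set i x).getD i d = x := by
  simp [List.getD_eq_getElem?_getD, List.getElem?_set_self h]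

lemma pvGetD_set_ne {α : Type} (l : List α) (i j : Nat) (x d : α) (h : i ≠ j) :
    (l.set i x).getD j d = l.getD j d := by
  simp [List.getD_eq_getElem?_getD, List.getElem?_set_ne h]

lemma pvGet2_set2_same (t : List (List (Option Int))) (a b : Nat) (x : Option Int)
    (ha : a < t.length) (hb : b < (t.getD a []).length) :
    pvGet2 (pvSet2 t a b x) a b = x := by
  unfold pvGet2 pvSet2
  rw [pvGetD_set_self _ _ _ _ (by simpa using ha), pvGetD_set_self _ _ _ _ hb]

lemma pvGet2_set2_ne (t : List (List (Option Int))) (a b a' b' : Nat) (x : Option Int)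
    (h : ¬(a = a' ∧ b = b')) :
    pvGet2 (pvSet2 t a b x) a' b' = pvGet2 t a' b' := by
  unfold pvGet2 pvSet2
  by_cases haa : a = a'
  · subst haa
    have hbb : b ≠ b' := by tauto
    by_cases ha : a < t.length
    · rw [pvGetD_set_self _ _ _ _ (by simpa using ha), pvGetD_set_ne _ _ _ _ _ hbb]
    · rw [List.set_eq_of_length_le (by omega)]
  · rw [pvGetD_set_ne _ _ _ _ _ haa]

lemma pvSet2_length (t : List (List (Option Int))) (a b : Nat) (x : Option Int) :
    (pvSet2 t a b x).length = t.length := by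
  simp [pvSet2]

lemma pvSet2_rows (t : List (List (Option Int))) (a b : Nat) (x : Option Int) (L : Nat)
    (h : ∀ r ∈ t, r.length = L) : ∀ r ∈ pvSet2 t a b x, r.length = L := by
  intro r hr
  unfold pvSet2 at hr
  by_cases ha : a < t.length
  · rcases List.mem_or_eq_of_mem_set hr with h1 | h1
    · exact h r h1
    · subst h1
      simp [List.getD_eq_getElem?_getD, List.getElem?_eq_getElem ha,
        h _ (List.getElem_mem ha)]
  · rw [List.set_eq_of_length_le (by omega)] at hr
    exact h r hr

-- subset-nonemptiness agreement between the two ports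
lemma pvGetSubset_ne_nil_iff (s f : List Int) (i j : Nat) :
    (pvGetSubset s f i j ≠ []) ↔ pvNonempty s f s.length i j = true := by
  simp [pvGetSubset, pvNonempty, List.filter_eq_nil_iff, List.any_eq_true]

-- the cells A's tables hold once a region is processed
def pvDone (c1 c2 a b : Nat) : Bool := a < b ∧ (b - a < c1 ∨ (b - a = c1 ∧ b < c2))

def pvInv (s f v : List Int) (l : Nat) (c1 c2 : Nat)
    (T : List (List (Option Int)) × List (List (Option Int))) : Prop :=
  T.1.length = l ∧ (∀ r ∈ T.1, r.length = l) ∧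
  T.2.length = l ∧ (∀ r ∈ T.2, r.length = l) ∧
  (∀ a b, a < l → b < l →
    pvGet2 T.1 a b = (if a = b then some 0 else
      if pvDone c1 c2 a b then some (pvPure s f v l (b - a) a b).1 else none) ∧
    pvGet2 T.2 a b = (if pvDone c1 c2 a b then some (pvPure s f v l (b - a) a b).2 else none))

lemma pvInv_init (s f v : List Int) :
    pvInv s f v s.length 1 1
      ((List.range s.length).foldl (fun t a => pvSet2 t a a (some 0))
        (List.replicate s.length (List.replicate s.length (none : Option Int))),
       List.replicate s.length (List.replicate s.length (none : Option Int))) := by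
  have base_len : (List.replicate s.length (List.replicate s.length (none : Option Int))).length = s.length := by
    simp
  have base_rows : ∀ r ∈ List.replicate s.length (List.replicate s.length (none : Option Int)),
      r.length = s.length := by
    intro r hr
    rw [List.eq_of_mem_replicate hr]
    simp
  have base_get : ∀ a b : Nat,
      pvGet2 (List.replicate s.length (List.replicate s.length (none : Option Int))) a b = none := by
    intro a b
    simp only [pvGet2, List.getD_eq_getElem?_getD, List.getElem?_replicate]
    split_ifs with h
    · simp [List.getElem?_replicate]
      split_ifs <;> simp
    · simp
  have fold_char : ∀ (as : List Nat) (t : List (List (Option Int))),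
      (∀ a ∈ as, a < s.length) → t.length = s.length → (∀ r ∈ t, r.length = s.length) →
      (as.foldl (fun t a => pvSet2 t a a (some 0)) t).length = s.length ∧
      (∀ r ∈ as.foldl (fun t a => pvSet2 t a a (some 0)) t, r.length = s.length) ∧
      (∀ a b : Nat, pvGet2 (as.foldl (fun t a => pvSet2 t a a (some 0)) t) a b =
        if a = b ∧ a ∈ as then some 0 else pvGet2 t a b) := by
    intro as
    induction as with
    | nil =>
      intro t _ h1 h2
      refine ⟨h1, h2, fun a b => ?_⟩
      simp
    | cons c as IHas =>
      intro t hbd h1 h2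
      simp only [List.foldl_cons]
      have hc : c < s.length := hbd c List.mem_cons_self
      obtain ⟨F1, F2, F3⟩ := IHas (pvSet2 t c c (some 0))
        (fun a ha => hbd a (List.mem_cons_of_mem _ ha))
        (by rw [pvSet2_length]; exact h1)
        (pvSet2_rows t c c (some 0) s.length h2)
      refine ⟨F1, F2, fun a b => ?_⟩
      rw [F3]
      by_cases hab : a = b ∧ a ∈ c :: as
      · obtain ⟨rfl, hmem⟩ := hab
        rcases List.mem_cons.mp hmem with rfl | hmem'
        · by_cases hin : a ∈ as
          · simp [hin]
          · rw [if_neg (by tauto), if_pos (by tauto)]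
            have hrow : (t.getD a []).length = s.length := by
              rw [List.getD_eq_getElem?_getD, List.getElem?_eq_getElem (by omega)]
              exact h2 _ (List.getElem_mem _)
            exact pvGet2_set2_same t a a (some 0) (by omega) (by omega)
        · rw [if_pos (⟨rfl, hmem'⟩ : a = a ∧ a ∈ as),
            if_pos (⟨rfl, hmem⟩ : a = a ∧ a ∈ c :: as)]
      · rw [if_neg hab]
        by_cases hab2 : a = b ∧ a ∈ as
        · rw [if_pos hab2]
          exact absurd ⟨hab2.1, List.mem_cons_of_mem _ hab2.2⟩ hab
        · rw [if_neg hab2]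
          refine pvGet2_set2_ne t c c a b (some 0) ?_
          rintro ⟨rfl, rfl⟩
          exact hab ⟨rfl, List.mem_cons_self⟩
  obtain ⟨F1, F2, F3⟩ := fold_char (List.range s.length)
    (List.replicate s.length (List.replicate s.length (none : Option Int)))
    (fun a ha => List.mem_range.mp ha) base_len base_rows
  refine ⟨F1, F2, base_len, base_rows, fun a b ha hb => ⟨?_, ?_⟩⟩
  · rw [F3, base_get]
    by_cases hab : a = b
    · subst hab
      rw [if_pos ⟨rfl, List.mem_range.mpr ha⟩, if_pos rfl]
    · rw [if_neg (by tauto), if_neg hab]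
      have hD : pvDone 1 1 a b = false := by
        simp only [pvDone, decide_eq_false_iff_not]
        omega
      rw [hD]
      simp
  · rw [base_get]
    have hD : pvDone 1 1 a b = false := by
      simp only [pvDone, decide_eq_false_iff_not]
      omega
    rw [hD]
    simp

def pvStepFn (s f v : List Int) (c1 : Nat)
    (st : List (List (Option Int)) × List (List (Option Int))) (c2 : Nat) :
    List (List (Option Int)) × List (List (Option Int)) :=
  let i := c2 - c1
  let j := c2
  let mk : Int × Int := (List.range' (i + 1) (j - (i + 1))).foldl
    (fun p k =>
      if pvGetSubset s f i j ≠ [] then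
        let tmp := (pvGet2 st.1 i k).getD 0 + (pvGet2 st.1 k j).getD 0 + v.getD k 0
        if tmp > p.1 then (tmp, (k : Int)) else p
      else p) (0, -1)
  (pvSet2 st.1 i j (some mk.1), pvSet2 st.2 i j (some mk.2))

lemma pvRowLen (t : List (List (Option Int))) (l a : Nat)
    (h1 : t.length = l) (h2 : ∀ r ∈ t, r.length = l) (ha : a < l) :
    (t.getD a []).length = l := by
  rw [List.getD_eq_getElem?_getD, List.getElem?_eq_getElem (by omega)]
  exact h2 _ (List.getElem_mem _)

lemma pvFoldl_id {α β : Type} (L : List β) (p : α) : L.foldl (fun p _ => p) p = p := by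
  induction L with
  | nil => rfl
  | cons x L IH => exact IH

lemma pvStep (s f v : List Int) (c1 c2 : Nat) (hc1 : 1 ≤ c1) (hcc : c1 ≤ c2)
    (hl : c2 < s.length)
    (T : List (List (Option Int)) × List (List (Option Int)))
    (h : pvInv s f v s.length c1 c2 T) :
    pvInv s f v s.length c1 (c2 + 1) (pvStepFn s f v c1 T c2) := by
  obtain ⟨L1, R1, L2, R2, HC⟩ := h
  simp only [pvStepFn]
  obtain ⟨i, hi⟩ : ∃ i, c2 - c1 = i := ⟨_, rfl⟩
  rw [hi]
  have hij : i < c2 := by omega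
  have hgap : c2 - i = c1 := by omega
  have hil : i < s.length := by omega
  have hmk : (List.range' (i + 1) (c2 - (i + 1))).foldl
      (fun p k =>
        if pvGetSubset s f i c2 ≠ [] then
          let tmp := (pvGet2 T.1 i k).getD 0 + (pvGet2 T.1 k c2).getD 0 + v.getD k 0
          if tmp > p.1 then (tmp, (k : Int)) else p
        else p) (0, -1) = pvPure s f v s.length (c2 - i) i c2 := by
    by_cases hne : pvGetSubset s f i c2 = []
    · have hN : pvNonempty s f s.length i c2 = false := by
        rcases Bool.eq_false_or_eq_true (pvNonempty s f s.length i c2) with h' | h'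
        · exact absurd ((pvGetSubset_ne_nil_iff s f i c2).mpr h') (by simp [hne])
        · exact h'
      rw [pvPure_spec s f v s.length i c2 hij, if_neg (by simp [hN])]
      exact (PySem.List.foldl_congr_mem _ _ (fun p _ => p) _
        (by intro p k _; simp [hne])).trans (pvFoldl_id _ _)
    · have hN : pvNonempty s f s.length i c2 = true :=
        (pvGetSubset_ne_nil_iff s f i c2).mp hne
      by_cases hij2 : i + 1 < c2
      · rw [pvPure_spec s f v s.length i c2 hij, if_pos ⟨hij2, hN⟩]
        apply PySem.List.foldl_congr_mem
        intro p k hk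
        have hk' : i + 1 ≤ k ∧ k < i + 1 + (c2 - (i + 1)) := List.mem_range'_1.mp hk
        have e1 : pvGet2 T.1 i k = some (pvPure s f v s.length (k - i) i k).1 := by
          rw [(HC i k hil (by omega)).1, if_neg (by omega), if_pos (by
            simp only [pvDone, decide_eq_true_eq]
            omega)]
        have e2 : pvGet2 T.1 k c2 = some (pvPure s f v s.length (c2 - k) k c2).1 := by
          rw [(HC k c2 (by omega) hl).1, if_neg (by omega), if_pos (by
            simp only [pvDone, decide_eq_true_eq]
            omega)]
        rw [if_pos hne]
        simp only [e1, e2, Option.getD_some]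
      · have hz : c2 - (i + 1) = 0 := by omega
        rw [hz, pvPure_spec s f v s.length i c2 hij, if_neg (by rintro ⟨h', -⟩; omega)]
        rfl
  refine ⟨?_, ?_, ?_, ?_, ?_⟩
  · rw [pvSet2_length]; exact L1
  · exact pvSet2_rows T.1 i c2 _ s.length R1
  · rw [pvSet2_length]; exact L2
  · exact pvSet2_rows T.2 i c2 _ s.length R2
  · intro a b ha hb
    by_cases hab : a = i ∧ b = c2
    · obtain ⟨rfl, rfl⟩ := hab
      have hrow1 : (T.1.getD a []).length = s.length := pvRowLen T.1 s.length a L1 R1 hil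
      have hrow2 : (T.2.getD a []).length = s.length := pvRowLen T.2 s.length a L2 R2 hil
      have hD : pvDone c1 (b + 1) a b = true := by
        simp only [pvDone, decide_eq_true_eq]
        omega
      constructor
      · rw [pvGet2_set2_same T.1 a b _ (by omega) (by omega), hmk,
          if_neg (by omega), hD, if_pos rfl]
      · rw [pvGet2_set2_same T.2 a b _ (by omega) (by omega), hmk, hD, if_pos rfl]
    · have hDD : pvDone c1 (c2 + 1) a b = pvDone c1 c2 a b := by
        simp only [pvDone]
        rw [decide_eq_decide]
        omega
      constructor
      · rw [pvGet2_set2_ne T.1 i c2 a b _ (by tauto), (HC a b ha hb).1, hDD]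
      · rw [pvGet2_set2_ne T.2 i c2 a b _ (by tauto), (HC a b ha hb).2, hDD]

lemma pvInv_shift (s f v : List Int) (c1 : Nat)
    (T : List (List (Option Int)) × List (List (Option Int)))
    (h : pvInv s f v s.length c1 s.length T) :
    pvInv s f v s.length (c1 + 1) (c1 + 1) T := by
  obtain ⟨L1, R1, L2, R2, HC⟩ := h
  refine ⟨L1, R1, L2, R2, fun a b ha hb => ?_⟩
  have hDD : pvDone (c1 + 1) (c1 + 1) a b = pvDone c1 s.length a b := by
    simp only [pvDone]
    rw [decide_eq_decide]
    omega
  rw [hDD]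
  exact HC a b ha hb

lemma pvInner (s f v : List Int) (c1 : Nat) (hc1 : 1 ≤ c1) :
    ∀ (n c2 : Nat) (T : List (List (Option Int)) × List (List (Option Int))),
      c1 ≤ c2 → c2 + n ≤ s.length → pvInv s f v s.length c1 c2 T →
      pvInv s f v s.length c1 (c2 + n)
        ((List.range' c2 n).foldl (pvStepFn s f v c1) T) := by
  intro n
  induction n with
  | zero => exact fun c2 T _ _ h => h
  | succ n IH =>
    intro c2 T hcc hbd h
    rw [List.range'_succ, List.foldl_cons,
      show c2 + (n + 1) = (c2 + 1) + n by omega]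
    exact IH (c2 + 1) _ (by omega) (by omega)
      (pvStep s f v c1 c2 hc1 hcc (by omega) T h)

lemma pvOuter (s f v : List Int) :
    ∀ (n c1 : Nat) (T : List (List (Option Int)) × List (List (Option Int))),
      1 ≤ c1 → c1 + n = s.length → pvInv s f v s.length c1 c1 T →
      pvInv s f v s.length (c1 + n) (c1 + n)
        ((List.range' c1 n).foldl
          (fun st c1 => (List.range' c1 (s.length - c1)).foldl (pvStepFn s f v c1) st) T) := by
  intro n
  induction n with
  | zero => exact fun c1 T _ _ h => h
  | succ n IH =>
    intro c1 T hc1 hsum h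
    rw [List.range'_succ, List.foldl_cons,
      show c1 + (n + 1) = (c1 + 1) + n by omega]
    refine IH (c1 + 1) _ (by omega) (by omega) ?_
    apply pvInv_shift
    have := pvInner s f v c1 hc1 (s.length - c1) c1 T (le_refl c1) (by omega) h
    rwa [show c1 + (s.length - c1) = s.length by omega] at this

lemma pvInv_final (s f v : List Int) :
    pvInv s f v s.length s.length s.length (ASPDynamic s f v) := by
  have hA : ASPDynamic s f v =
      (List.range' 1 (s.length - 1)).foldl
        (fun st c1 => (List.range' c1 (s.length - c1)).foldl (pvStepFn s f v c1) st)
        ((List.range s.length).foldl (fun t a => pvSet2 t a a (some 0))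
          (List.replicate s.length (List.replicate s.length (none : Option Int))),
         List.replicate s.length (List.replicate s.length (none : Option Int))) := rfl
  rcases Nat.eq_zero_or_pos s.length with hz | hpos
  · obtain rfl : s = [] := List.length_eq_zero_iff.mp hz
    exact ⟨rfl, by simp [ASPDynamic, pvSet2], rfl, by simp [ASPDynamic, pvSet2],
      fun a b ha hb => absurd ha (by omega)⟩
  · have := pvOuter s f v (s.length - 1) 1
      ((List.range s.length).foldl (fun t a => pvSet2 t a a (some 0))
        (List.replicate s.length (List.replicate s.length (none : Option Int))),
       List.replicate s.length (List.replicate s.length (none : Option Int)))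
      (le_refl 1) (by omega) (pvInv_init s f v)
    rw [show 1 + (s.length - 1) = s.length by omega] at this
    rwa [hA]

lemma pvGet2_eq_getElem (t : List (List (Option Int))) (a b : Nat)
    (h1 : a < t.length) (h2 : b < (t[a]'h1).length) :
    pvGet2 t a b = (t[a]'h1)[b]'h2 := by
  unfold pvGet2
  rw [List.getD_eq_getElem?_getD (l := t), List.getElem?_eq_getElem h1]
  simp [List.getD_eq_getElem?_getD, List.getElem?_eq_getElem h2]

theorem ASPDynamic_spec : Claim_equal_ASPDynamic := by
  intro s f v _ _
  unfold Spec_ASPDynamic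
  obtain ⟨L1, R1, L2, R2, HC⟩ := pvInv_final s f v
  have hmemo := pvMemo_complete s f v s.length
  simp only [ASPDynamic_alt]
  have hDoneT : ∀ a b : Nat, a < b → b < s.length → pvDone s.length s.length a b = true := by
    intro a b hab hbl
    simp only [pvDone, decide_eq_true_eq]
    omega
  have hDoneF : ∀ a b : Nat, ¬ a < b → pvDone s.length s.length a b = false := by
    intro a b hab
    simp only [pvDone, decide_eq_false_iff_not]
    omega
  refine Prod.ext ?_ ?_
  · apply List.ext_getElem
    · simp [L1]
    · intro a h1 h2
      have ha : a < s.length := by omega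
      apply List.ext_getElem
      · simp [R1 _ (List.getElem_mem h1)]
      · intro b hb1 hb2
        have hb : b < s.length := by
          rwa [R1 _ (List.getElem_mem h1)] at hb1
        rw [← pvGet2_eq_getElem _ a b h1 hb1, (HC a b ha hb).1]
        simp only [List.getElem_map, List.getElem_range]
        by_cases hab : a = b
        · simp [hab]
        · rw [if_neg hab, if_neg hab]
          by_cases hlt : a < b
          · rw [hDoneT a b hlt hb, if_pos rfl, if_pos hlt,
              PySem.Dict.getD_of_get?_eq_some _ _ (hmemo a b hlt hb)]
          · rw [hDoneF a b hlt, if_neg hlt]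
            simp
  · apply List.ext_getElem
    · simp [L2]
    · intro a h1 h2
      have ha : a < s.length := by omega
      apply List.ext_getElem
      · simp [R2 _ (List.getElem_mem h1)]
      · intro b hb1 hb2
        have hb : b < s.length := by
          rwa [R2 _ (List.getElem_mem h1)] at hb1
        rw [← pvGet2_eq_getElem _ a b h1 hb1, (HC a b ha hb).2]
        simp only [List.getElem_map, List.getElem_range]
        by_cases hlt : a < b
        · rw [hDoneT a b hlt hb, if_pos rfl, if_pos hlt,
            PySem.Dict.getD_of_get?_eq_some _ _ (hmemo a b hlt hb)]
        · rw [hDoneF a b hlt, if_neg hlt]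
          simp
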